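-- pv_equiv track=rewrite | github.com/mistakeknot/tldr-swinton | src/tldr_swinton/engines/difflens.py | _split_blocks_by_blank
-- ===== SOURCE A (Python) =====
-- def _split_blocks_by_blank(lines: list[str]) -> list[tuple[int, int]]:
--     blocks: list[tuple[int, int]] = []
--     start = 0
--     idx = 0
--     while idx < len(lines):
--         if lines[idx].strip() == "" or lines[idx].strip() == "...":
--             if start < idx:
--                 blocks.append((start, idx - 1))
--             start = idx + 1
--         idx += 1
--     if start < len(lines):
--         blocks.append((start, len(lines) - 1))
--     return blocks or [(0, len(lines) - 1)]
-- ===== SOURCE B (Python) =====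
-- def _split_blocks_by_blank(lines: list[str]) -> list[tuple[int, int]]:
--     seps = [i for i, ln in enumerate(lines) if ln.strip() in ("", "...")]
--     bounds = [-1] + seps + [len(lines)]
--     blocks = [(a + 1, b - 1) for a, b in zip(bounds, bounds[1:]) if a + 1 <= b - 1]
--     return blocks or [(0, len(lines) - 1)]
-- ===== Notes on version B (the rewrite author's own statement) =====
-- stated objective: alternative
-- what changed: Replaces the running-start stateful while loop with a separator-index table plus a gap-walking pass over consecutive boundary pairs.
import Mathlib
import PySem

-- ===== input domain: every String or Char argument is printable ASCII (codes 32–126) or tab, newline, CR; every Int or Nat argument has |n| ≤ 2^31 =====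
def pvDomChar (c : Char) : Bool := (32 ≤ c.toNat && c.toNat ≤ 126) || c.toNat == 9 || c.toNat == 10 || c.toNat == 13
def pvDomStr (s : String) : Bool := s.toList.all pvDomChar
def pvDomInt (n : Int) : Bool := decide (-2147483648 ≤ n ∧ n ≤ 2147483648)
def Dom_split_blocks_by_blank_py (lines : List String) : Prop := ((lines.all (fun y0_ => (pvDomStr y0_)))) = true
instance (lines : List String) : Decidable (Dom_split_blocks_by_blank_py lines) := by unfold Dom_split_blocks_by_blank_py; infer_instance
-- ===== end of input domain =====

-- B replaces A's running-start while loop by a separator-index table followed by a gap-walking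
-- pass over consecutive boundary pairs (objective: alternative decomposition, same O(n) cost).


-- shared with both ports: 'line.strip() == "" or line.strip() == "..."'
def pvIsSep (l : String) : Bool := PySem.Str.strip l == "" || PySem.Str.strip l == "..."

-- ===== PORT A =====
-- the while loop: state (blocks, start), idx is the absolute index of the head of the remaining list
def pvLoopA : List String → List (Int × Int) → Int → Int → (List (Int × Int) × Int)
  | [], blocks, start, _idx => (blocks, start)
  | l :: rest, blocks, start, idx =>
      if pvIsSep l then
        pvLoopA rest (if start < idx then blocks ++ [(start, idx - 1)] else blocks) (idx + 1) (idx + 1)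
      else
        pvLoopA rest blocks start (idx + 1)

def split_blocks_by_blank_py (lines : List String) : List (Int × Int) :=
  let n : Int := (lines.length : Int)
  let r := pvLoopA lines [] 0 0
  let blocks := if r.2 < n then r.1 ++ [(r.2, n - 1)] else r.1
  if blocks = [] then [(0, n - 1)] else blocks

-- ===== PORT B =====
-- '[i for i, ln in enumerate(lines) if ln.strip() in ("", "...")]' with running index i
def pvSepIdx : List String → Int → List Int
  | [], _ => []
  | l :: rest, i => if pvIsSep l then i :: pvSepIdx rest (i + 1) else pvSepIdx rest (i + 1)

def split_blocks_by_blank_py_alt (lines : List String) : List (Int × Int) :=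
  let n : Int := (lines.length : Int)
  let bounds : List Int := -1 :: (pvSepIdx lines 0 ++ [n])
  let blocks := (bounds.zip (bounds.drop 1)).filterMap
      (fun p => if p.1 + 1 ≤ p.2 - 1 then some (p.1 + 1, p.2 - 1) else none)
  if blocks = [] then [(0, n - 1)] else blocks

-- ===== PRECONDITION & SPEC =====
def Spec_split_blocks_by_blank_py (lines : List String) (out : List (Int × Int)) : Prop := out = split_blocks_by_blank_py_alt lines
instance (lines : List String) (out : List (Int × Int)) : Decidable (Spec_split_blocks_by_blank_py lines out) := by unfold Spec_split_blocks_by_blank_py; infer_instance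

-- ===== CLAIM (what is proved, stated in full; the proofs are below) =====
def Claim_equal_split_blocks_by_blank_py : Prop := ∀ (lines : List String), Dom_split_blocks_by_blank_py lines → Spec_split_blocks_by_blank_py lines (split_blocks_by_blank_py lines)

-- ===== LEMMAS AND PROOFS =====

-- the blocks determined by previous boundary a, the separator indices, and final boundary n
def pvGaps : Int → List Int → Int → List (Int × Int)
  | a, [], n => if a + 1 ≤ n - 1 then [(a + 1, n - 1)] else []
  | a, s :: ss, n => (if a + 1 ≤ s - 1 then [(a + 1, s - 1)] else []) ++ pvGaps s ss n

theorem pvLoopA_spec (rest : List String) (blocks : List (Int × Int)) (start idx : Int) :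
    (if (pvLoopA rest blocks start idx).2 < idx + (rest.length : Int) then
        (pvLoopA rest blocks start idx).1 ++ [((pvLoopA rest blocks start idx).2, idx + (rest.length : Int) - 1)]
      else (pvLoopA rest blocks start idx).1)
    = blocks ++ pvGaps (start - 1) (pvSepIdx rest idx) (idx + (rest.length : Int)) := by
  induction rest generalizing blocks start idx with
  | nil =>
      simp only [pvLoopA, pvSepIdx, pvGaps, List.length_nil, Int.ofNat_zero]
      split_ifs with h1 h2 h2 <;> simp_all <;> omega
  | cons l rest ih =>
      simp only [pvLoopA, pvSepIdx, List.length_cons]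
      by_cases hs : pvIsSep l = true
      · simp only [hs, if_pos, pvGaps]
        have := ih (if start < idx then blocks ++ [(start, idx - 1)] else blocks) (idx + 1) (idx + 1)
        have harith : idx + ((rest.length : Int) + 1) = (idx + 1) + (rest.length : Int) := by push_cast; omega
        rw [show ((rest.length + 1 : Nat) : Int) = (rest.length : Int) + 1 by push_cast; ring, harith, this]
        split_ifs with h1 h2 <;> simp_all <;> omega
      · simp only [hs, if_neg, Bool.false_eq_true, not_false_iff, if_false]
        have := ih blocks start (idx + 1)
        rw [show ((rest.length + 1 : Nat) : Int) = (rest.length : Int) + 1 by push_cast; ring,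
            show idx + ((rest.length : Int) + 1) = (idx + 1) + (rest.length : Int) by ring, this]

theorem pvZip_gaps (ss : List Int) (a n : Int) :
    (((a :: (ss ++ [n])).zip (ss ++ [n])).filterMap
      (fun p => if p.1 + 1 ≤ p.2 - 1 then some (p.1 + 1, p.2 - 1) else none))
    = pvGaps a ss n := by
  induction ss generalizing a with
  | nil => simp [pvGaps, List.filterMap]; split_ifs <;> simp
  | cons s ss ih =>
      simp only [List.cons_append, List.zip_cons_cons, List.filterMap_cons, pvGaps]
      rw [← ih s]
      split_ifs <;> simp

-- ===== VERDICT (by name: the statement is the Claim_ definition above) =====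
theorem split_blocks_by_blank_py_spec : Claim_equal_split_blocks_by_blank_py := by
  intro lines _
  unfold Spec_split_blocks_by_blank_py split_blocks_by_blank_py split_blocks_by_blank_py_alt
  have hA := pvLoopA_spec lines [] 0 0
  simp only [zero_add, List.nil_append] at hA
  have hB := pvZip_gaps (pvSepIdx lines 0) (-1) (lines.length : Int)
  simp only [List.drop_one, List.tail_cons]
  rw [show (0 : Int) - 1 = -1 from rfl] at hA
  rw [hB, hA]
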